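-- pv_equiv track=rewrite | github.com/c0derArmy/Zeus-Scanner-V3 | lib/ai_engine/ai_analyzer.py | _generate_exploitation_path
-- ===== SOURCE A (Python) =====
-- from typing import List, Dict, Any
--
-- def _generate_exploitation_path(vulnerabilities: List[Dict]) -> List[str]:
--     """
--     Generate step-by-step exploitation path
--     """
--     path = []
--
--     # Sort vulnerabilities by severity for optimal exploitation order
--     severity_order = {'HIGH': 3, 'MEDIUM': 2, 'LOW': 1}
--     sorted_vulns = sorted(vulnerabilities, key=lambda v: severity_order.get(v.get('severity', 'LOW'), 1), reverse=True)
--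
--     for i, vuln in enumerate(sorted_vulns, 1):
--         step = f"Step {i}: Exploit {vuln.get('type', 'Unknown')} vulnerability"
--         if vuln.get('parameter'):
--             step += f" via parameter '{vuln.get('parameter')}'"
--         path.append(step)
--
--     return path
-- ===== SOURCE B (Python) =====
-- def _step(i, vuln):
--     base = "Step {}: Exploit {} vulnerability".format(i, vuln.get('type', 'Unknown'))
--     param = vuln.get('parameter')
--     return base + (" via parameter '{}'".format(param) if param else "")
--
--
-- def _generate_exploitation_path(vulnerabilities):
--     """
--     Generate step-by-step exploitation path.
--
--     Severity has only three categories, so instead of a comparison sort we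
--     distribute the vulnerabilities over three buckets (HIGH, MEDIUM, and
--     everything else) in one pass, concatenate the buckets, and number the steps.
--     """
--     high, medium, low = [], [], []
--     for vuln in vulnerabilities:
--         sev = vuln.get('severity', 'LOW')
--         if sev == 'HIGH':
--             high.append(vuln)
--         elif sev == 'MEDIUM':
--             medium.append(vuln)
--         else:
--             low.append(vuln)
--     return [_step(i, vuln) for i, vuln in enumerate(high + medium + low, 1)]
-- ===== Notes on version B (the rewrite author's own statement) =====
-- stated objective: alternative
-- what changed: Replaces the keyed descending comparison sort with a single stable three-bucket distribution pass (HIGH/MEDIUM/other) followed by concatenation, and builds the steps with a helper and a comprehension instead of an accumulating loop.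
import Mathlib
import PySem

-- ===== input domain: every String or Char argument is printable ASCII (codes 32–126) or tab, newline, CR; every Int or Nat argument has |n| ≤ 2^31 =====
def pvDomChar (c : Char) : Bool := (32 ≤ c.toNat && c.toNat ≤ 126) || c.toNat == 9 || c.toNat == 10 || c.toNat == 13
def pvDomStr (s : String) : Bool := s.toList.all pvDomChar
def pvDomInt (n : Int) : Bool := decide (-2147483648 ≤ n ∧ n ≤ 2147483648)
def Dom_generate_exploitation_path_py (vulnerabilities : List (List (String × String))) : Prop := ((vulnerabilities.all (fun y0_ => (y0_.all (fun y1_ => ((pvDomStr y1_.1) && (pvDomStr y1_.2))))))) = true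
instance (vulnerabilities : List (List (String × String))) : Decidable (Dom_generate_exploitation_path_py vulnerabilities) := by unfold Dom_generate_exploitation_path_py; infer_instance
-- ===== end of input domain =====

-- ===== PORT A =====
-- Literal port of A: stable descending sort by the severity_order lookup, then an
-- accumulating loop over enumerate(..., 1) building the step strings.
def generate_exploitation_path_py (vulnerabilities : List (List (String × String))) : List String :=
  let severity_order : List (String × Int) := [("HIGH", 3), ("MEDIUM", 2), ("LOW", 1)]
  let sorted_vulns := PySem.List.sorted vulnerabilities
    (fun v => PySem.Dict.getD (PySem.Dict.mk severity_order) (PySem.Dict.getD (PySem.Dict.mk v) "severity" "LOW") 1) true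
  (PySem.List.enumerate sorted_vulns 1).foldl (fun path iv =>
    let step := "Step " ++ PySem.Int.toStr iv.1 ++ ": Exploit "
      ++ PySem.Dict.getD (PySem.Dict.mk iv.2) "type" "Unknown" ++ " vulnerability"
    let step :=
      match PySem.Dict.get? (PySem.Dict.mk iv.2) "parameter" with
      | some p => if p ≠ "" then step ++ " via parameter '" ++ p ++ "'" else step
      | none => step
    path ++ [step]) []

-- ===== PORT B =====
-- Port of B: one stable three-bucket distribution pass, concatenation, then a map
-- over enumerate(..., 1) through the _step helper.
def pvStepB (i : Int) (v : List (String × String)) : String :=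
  let base := "Step " ++ PySem.Int.toStr i ++ ": Exploit "
    ++ PySem.Dict.getD (PySem.Dict.mk v) "type" "Unknown" ++ " vulnerability"
  base ++ (match PySem.Dict.get? (PySem.Dict.mk v) "parameter" with
    | some p => if p ≠ "" then " via parameter '" ++ p ++ "'" else ""
    | none => "")

def pvBucketStep
    (acc : List (List (String × String)) × List (List (String × String)) × List (List (String × String)))
    (vuln : List (String × String)) :
    List (List (String × String)) × List (List (String × String)) × List (List (String × String)) :=
  let sev := PySem.Dict.getD (PySem.Dict.mk vuln) "severity" "LOW"
  if sev = "HIGH" then (acc.1 ++ [vuln], acc.2.1, acc.2.2)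
  else if sev = "MEDIUM" then (acc.1, acc.2.1 ++ [vuln], acc.2.2)
  else (acc.1, acc.2.1, acc.2.2 ++ [vuln])

def generate_exploitation_path_py_alt (vulnerabilities : List (List (String × String))) : List String :=
  let b := vulnerabilities.foldl pvBucketStep ([], [], [])
  (PySem.List.enumerate (b.1 ++ (b.2.1 ++ b.2.2)) 1).map (fun iv => pvStepB iv.1 iv.2)

-- ===== PRECONDITION & SPEC =====
def Spec_generate_exploitation_path_py (vulnerabilities : List (List (String × String))) (out : List String) : Prop := out = generate_exploitation_path_py_alt vulnerabilities
instance (vulnerabilities : List (List (String × String))) (out : List String) : Decidable (Spec_generate_exploitation_path_py vulnerabilities out) := by unfold Spec_generate_exploitation_path_py; infer_instance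

-- ===== CLAIM (what is proved, stated in full; the proofs are below) =====
def Claim_equal_generate_exploitation_path_py : Prop := ∀ (vulnerabilities : List (List (String × String))), Dom_generate_exploitation_path_py vulnerabilities → Spec_generate_exploitation_path_py vulnerabilities (generate_exploitation_path_py vulnerabilities)

-- ===== LEMMAS AND PROOFS =====

-- A's sort key.
def pvKey (v : List (String × String)) : Int :=
  PySem.Dict.getD (PySem.Dict.mk [("HIGH", (3:Int)), ("MEDIUM", 2), ("LOW", 1)]) (PySem.Dict.getD (PySem.Dict.mk v) "severity" "LOW") 1

lemma pvSev_val (s : String) :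
    PySem.Dict.getD (PySem.Dict.mk [("HIGH", (3:Int)), ("MEDIUM", 2), ("LOW", 1)]) s 1
    = if s = "HIGH" then 3 else if s = "MEDIUM" then 2 else 1 := by
  by_cases h1 : s = "HIGH"
  · simp [h1, PySem.Dict.getD, PySem.Dict.get?, List.find?]
  have e1 : ("HIGH" == s) = false := beq_eq_false_iff_ne.mpr (Ne.symm h1)
  by_cases h2 : s = "MEDIUM"
  · simp [h2, PySem.Dict.getD, PySem.Dict.get?, List.find?]
  have e2 : ("MEDIUM" == s) = false := beq_eq_false_iff_ne.mpr (Ne.symm h2)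
  by_cases h3 : s = "LOW"
  · simp [h3, PySem.Dict.getD, PySem.Dict.get?, List.find?]
  · have e3 : ("LOW" == s) = false := beq_eq_false_iff_ne.mpr (Ne.symm h3)
    simp [h1, h2, e1, e2, e3, PySem.Dict.getD, PySem.Dict.get?, List.find?]

lemma pvKey_cases (v : List (String × String)) :
    (PySem.Dict.getD (PySem.Dict.mk v) "severity" "LOW" = "HIGH" ∧ pvKey v = 3) ∨
    (PySem.Dict.getD (PySem.Dict.mk v) "severity" "LOW" = "MEDIUM" ∧ pvKey v = 2) ∨
    (PySem.Dict.getD (PySem.Dict.mk v) "severity" "LOW" ≠ "HIGH" ∧ PySem.Dict.getD (PySem.Dict.mk v) "severity" "LOW" ≠ "MEDIUM" ∧ pvKey v = 1) := by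
  have := pvSev_val (PySem.Dict.getD (PySem.Dict.mk v) "severity" "LOW")
  by_cases h1 : PySem.Dict.getD (PySem.Dict.mk v) "severity" "LOW" = "HIGH"
  · left; exact ⟨h1, by simp_all [pvKey]⟩
  by_cases h2 : PySem.Dict.getD (PySem.Dict.mk v) "severity" "LOW" = "MEDIUM"
  · right; left; exact ⟨h2, by simp_all [pvKey]⟩
  · right; right; exact ⟨h1, h2, by simp_all [pvKey]⟩

lemma pvInsertBy_place (before : List (String × String) → List (String × String) → Bool)
    (x : List (String × String)) (pre post : List (List (String × String)))
    (hpre : ∀ y ∈ pre, before x y = false)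
    (hpost : ∀ y ∈ post, before x y = true) :
    PySem.List.insertBy before x (pre ++ post) = pre ++ x :: post := by
  induction pre with
  | nil =>
    cases post with
    | nil => simp [PySem.List.insertBy]
    | cons y ys => simp [PySem.List.insertBy, hpost y (by simp)]
  | cons y ys ih =>
    have hy : before x y = false := hpre y (by simp)
    simp only [List.cons_append, PySem.List.insertBy, hy]
    simp [ih (fun z hz => hpre z (by simp [hz]))]

-- the insertion-sort fold of A equals the bucket fold of B
lemma pvBuckets_inv (xs : List (List (String × String)))
    (h m l : List (List (String × String)))
    (hh : ∀ y ∈ h, pvKey y = 3) (hm : ∀ y ∈ m, pvKey y = 2) (hl : ∀ y ∈ l, pvKey y = 1) :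
    xs.foldl (fun acc x => PySem.List.insertBy (fun a b => decide (pvKey b < pvKey a)) x acc)
      (h ++ (m ++ l))
    = (let b := xs.foldl pvBucketStep (h, m, l); b.1 ++ (b.2.1 ++ b.2.2)) := by
  induction xs generalizing h m l with
  | nil => simp
  | cons x xs ih =>
    rcases pvKey_cases x with ⟨hs, hk⟩ | ⟨hs, hk⟩ | ⟨hs1, hs2, hk⟩
    · have hins : PySem.List.insertBy (fun a b => decide (pvKey b < pvKey a)) x (h ++ (m ++ l))
          = (h ++ [x]) ++ (m ++ l) := by
        rw [pvInsertBy_place _ x h (m ++ l)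
          (fun y hy => by simp [hk, hh y hy])
          (fun y hy => by
            rcases List.mem_append.mp hy with hy' | hy'
            · simp [hk, hm y hy']
            · simp [hk, hl y hy'])]
        simp
      simp only [List.foldl_cons, hins, pvBucketStep, hs]
      exact ih (h ++ [x]) m l
        (fun y hy => by rcases List.mem_append.mp hy with hy' | hy'
                        · exact hh y hy'
                        · simp at hy'; simpa [hy'] using hk) hm hl
    · have hins : PySem.List.insertBy (fun a b => decide (pvKey b < pvKey a)) x (h ++ (m ++ l))
          = h ++ ((m ++ [x]) ++ l) := by
        have : h ++ (m ++ l) = (h ++ m) ++ l := by simp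
        rw [this, pvInsertBy_place _ x (h ++ m) l
          (fun y hy => by
            rcases List.mem_append.mp hy with hy' | hy'
            · simp [hk, hh y hy']
            · simp [hk, hm y hy'])
          (fun y hy => by simp [hk, hl y hy])]
        simp
      have hsev : ¬ (PySem.Dict.getD (PySem.Dict.mk x) "severity" "LOW" = "HIGH") := by
        rw [hs]; decide
      simp only [List.foldl_cons, hins, pvBucketStep, hs]
      exact ih h (m ++ [x]) l hh
        (fun y hy => by rcases List.mem_append.mp hy with hy' | hy'
                        · exact hm y hy'
                        · simp at hy'; simpa [hy'] using hk) hl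
    · have hins : PySem.List.insertBy (fun a b => decide (pvKey b < pvKey a)) x (h ++ (m ++ l))
          = h ++ (m ++ (l ++ [x])) := by
        have : h ++ (m ++ l) = (h ++ (m ++ l)) ++ ([] : List (List (String × String))) := by simp
        rw [this, pvInsertBy_place _ x (h ++ (m ++ l)) []
          (fun y hy => by
            rcases List.mem_append.mp hy with hy' | hy'
            · simp [hk, hh y hy']
            · rcases List.mem_append.mp hy' with hy'' | hy''
              · simp [hk, hm y hy'']
              · simp [hk, hl y hy''])
          (fun y hy => by simp at hy)]
        simp
      simp only [List.foldl_cons, hins, pvBucketStep, if_neg hs1, if_neg hs2]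
      exact ih h m (l ++ [x]) hh hm
        (fun y hy => by rcases List.mem_append.mp hy with hy' | hy'
                        · exact hl y hy'
                        · simp at hy'; simpa [hy'] using hk)

lemma pvFoldl_snoc_map {α : Type} (F : α → String) (xs : List α) (acc : List String) :
    xs.foldl (fun p x => p ++ [F x]) acc = acc ++ xs.map F := by
  induction xs generalizing acc with
  | nil => simp
  | cons x xs ih => simp [ih]

-- A's inline step expression agrees with B's helper.
lemma pvStep_eq (iv : Int × List (String × String)) :
    (let step := "Step " ++ PySem.Int.toStr iv.1 ++ ": Exploit "
        ++ PySem.Dict.getD (PySem.Dict.mk iv.2) "type" "Unknown" ++ " vulnerability"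
     let step :=
        match PySem.Dict.get? (PySem.Dict.mk iv.2) "parameter" with
        | some p => if p ≠ "" then step ++ " via parameter '" ++ p ++ "'" else step
        | none => step
     step) = pvStepB iv.1 iv.2 := by
  simp only [pvStepB]
  cases hp : PySem.Dict.get? (PySem.Dict.mk iv.2) "parameter" with
  | none => simp
  | some p =>
    by_cases h : p = ""
    · simp [h]
    · simp only [h, ne_eq, not_false_iff, if_true]
      simp [← String.append_assoc]

-- ===== VERDICT (by name: the statement is the Claim_ definition above) =====
theorem generate_exploitation_path_py_spec : Claim_equal_generate_exploitation_path_py := by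
  intro vulns _
  have hsort : PySem.List.sorted vulns
      (fun v => PySem.Dict.getD (PySem.Dict.mk [("HIGH", (3:Int)), ("MEDIUM", 2), ("LOW", 1)])
        (PySem.Dict.getD (PySem.Dict.mk v) "severity" "LOW") 1) true
      = (vulns.foldl pvBucketStep ([], [], [])).1
        ++ ((vulns.foldl pvBucketStep ([], [], [])).2.1 ++ (vulns.foldl pvBucketStep ([], [], [])).2.2) := by
    rw [PySem.List.sorted_rev_eq_foldl_insertBy]
    have := pvBuckets_inv vulns [] [] [] (by simp) (by simp) (by simp)
    simpa [pvKey] using this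
  show generate_exploitation_path_py vulns = generate_exploitation_path_py_alt vulns
  unfold generate_exploitation_path_py generate_exploitation_path_py_alt
  simp only [hsort]
  rw [pvFoldl_snoc_map]
  simp only [List.nil_append]
  exact List.map_congr_left (fun iv _ => pvStep_eq iv)
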